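-- pv_equiv track=rewrite | github.com/Ryanrob327/CMPSC131 | RA_09.py | has_numbers
-- ===== SOURCE A (Python) =====
-- def has_numbers(num1: int, num2: int) -> int:
--     num1_last_digit = num1 % 10
--     num2_last_digit = num2 % 10
--     if num1 == 0:
--         return True
--     elif num2 == 0:
--         return False
--     if num1_last_digit == num2_last_digit:
--         return has_numbers(num1 // 10, num2 // 10)
--     else:
--         return has_numbers(num1, num2 // 10)
-- ===== SOURCE B (Python) =====
-- def _digits(n):
--     # least-significant-first digit list; empty for 0
--     d = []
--     while n > 0:
--         d.append(n % 10)
--         n //= 10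
--     return d
--
--
-- def has_numbers(num1, num2):
--     # True iff num1's digit sequence (from the least significant end) is a
--     # subsequence of num2's, matched greedily; a negative num1 never reduces
--     # to 0 digit by digit, so it can never be fully matched.
--     if num1 < 0:
--         return False
--     need = _digits(num1)
--     i = 0
--     for d in _digits(num2):
--         if i < len(need) and need[i] == d:
--             i += 1
--     return i == len(need)
-- ===== Notes on version B (the rewrite author's own statement) =====
-- stated objective: alternative
-- what changed: Replaces the numeric recursion by an explicit digit-list decomposition: B extracts both numbers' least-significant-first digit lists once and runs a single greedy subsequence scan with an index, instead of recursing on // 10.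
-- outside the precondition, e.g. on has_numbers(0, -1): A returns True, B returns True; on has_numbers(9, -1): A returns True, B returns False
import Mathlib
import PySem

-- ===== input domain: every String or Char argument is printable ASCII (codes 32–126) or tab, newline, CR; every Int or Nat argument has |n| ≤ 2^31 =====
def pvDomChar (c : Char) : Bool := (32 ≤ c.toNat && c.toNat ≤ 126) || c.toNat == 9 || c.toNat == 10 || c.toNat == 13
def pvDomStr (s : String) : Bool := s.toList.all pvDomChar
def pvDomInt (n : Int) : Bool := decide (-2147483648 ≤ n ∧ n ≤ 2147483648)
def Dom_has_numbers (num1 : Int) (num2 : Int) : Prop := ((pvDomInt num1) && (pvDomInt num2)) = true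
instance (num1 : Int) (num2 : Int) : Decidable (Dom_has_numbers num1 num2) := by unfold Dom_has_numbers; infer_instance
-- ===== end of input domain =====

-- B replaces A's numeric recursion by building least-significant-first digit lists once
-- and doing a single greedy subsequence scan (objective: alternative; same cost).


-- ===== PORT A =====
-- A is general recursion (num2 // 10 does not structurally decrease for num2 < 0);
-- ported with a fuel counter that is sufficient whenever 0 ≤ num2 (inside Pre_).
def has_numbers_go : Nat → Int → Int → Bool
  | 0, _, _ => false  -- fuel exhausted: unreachable for 0 ≤ num2 with fuel > num2.toNat
  | fuel + 1, num1, num2 =>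
    let num1_last_digit := PySem.Int.mod num1 10
    let num2_last_digit := PySem.Int.mod num2 10
    if num1 = 0 then true
    else if num2 = 0 then false
    else if num1_last_digit = num2_last_digit then
      has_numbers_go fuel (PySem.Int.floordiv num1 10) (PySem.Int.floordiv num2 10)
    else
      has_numbers_go fuel num1 (PySem.Int.floordiv num2 10)

def has_numbers (num1 : Int) (num2 : Int) : Bool :=
  has_numbers_go (num2.toNat + 1) num1 num2

-- ===== PORT B =====
-- least-significant-first digit list; [] for n ≤ 0
def pyDigits (n : Int) : List Int :=
  if h : 0 < n then PySem.Int.mod n 10 :: pyDigits (PySem.Int.floordiv n 10)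
  else []
termination_by n.toNat
decreasing_by
  rw [PySem.Int.floordiv_eq_ediv_of_pos (by omega : (0:Int) < 10)]
  omega

def has_numbers_alt (num1 : Int) (num2 : Int) : Bool :=
  if num1 < 0 then false
  else
    let need := pyDigits num1
    let i := (pyDigits num2).foldl
      (fun i d => if i < need.length ∧ need.getD i 0 = d then i + 1 else i) 0
    i == need.length

-- ===== PRECONDITION & SPEC =====
-- Pre_ excludes num2 < 0: there num2 // 10 never reaches 0, so A's recursion raises
-- RecursionError for most num1 (and B's loop has no corresponding digit list); on the few
-- num2 < 0 inputs where A still happens to return, termination has no closed form.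
def Pre_has_numbers (num1 : Int) (num2 : Int) : Prop := 0 ≤ num2
instance (num1 : Int) (num2 : Int) : Decidable (Pre_has_numbers num1 num2) := by
  unfold Pre_has_numbers; infer_instance

def pvWitness_has_numbers : Int × Int := (13, 103)

def Spec_has_numbers (num1 : Int) (num2 : Int) (out : Bool) : Prop := out = has_numbers_alt num1 num2
instance (num1 : Int) (num2 : Int) (out : Bool) : Decidable (Spec_has_numbers num1 num2 out) := by
  unfold Spec_has_numbers; infer_instance

-- ===== CLAIM (what is proved, stated in full; the proofs are below) =====
def Claim_equal_has_numbers : Prop := ∀ (num1 : Int) (num2 : Int), Dom_has_numbers num1 num2 → Pre_has_numbers num1 num2 → Spec_has_numbers num1 num2 (has_numbers num1 num2)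

-- ===== LEMMAS AND PROOFS =====

-- greedy subsequence matching, the recursive reading of B's fold
def subMatch : List Int → List Int → Bool
  | [], _ => true
  | _ :: _, [] => false
  | c :: cs, x :: xs => if c = x then subMatch cs xs else subMatch (c :: cs) xs

theorem subMatch_nil (hay : List Int) : subMatch [] hay = true := by
  cases hay <;> rfl

theorem pyDigits_pos {n : Int} (h : 0 < n) :
    pyDigits n = PySem.Int.mod n 10 :: pyDigits (PySem.Int.floordiv n 10) := by
  rw [pyDigits]; simp [h]

theorem pyDigits_nonpos {n : Int} (h : n ≤ 0) : pyDigits n = [] := by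
  rw [pyDigits]; simp [show ¬ 0 < n by omega]

theorem floordiv10_nonneg {n : Int} (h : 0 ≤ n) : 0 ≤ PySem.Int.floordiv n 10 := by
  rw [PySem.Int.floordiv_eq_ediv_of_pos (by omega : (0:Int) < 10)]
  omega

theorem floordiv10_lt {n : Int} (h : 0 < n) : PySem.Int.floordiv n 10 < n := by
  rw [PySem.Int.floordiv_eq_ediv_of_pos (by omega : (0:Int) < 10)]
  omega

theorem floordiv10_neg {n : Int} (h : n < 0) : PySem.Int.floordiv n 10 < 0 := by
  rw [PySem.Int.floordiv_eq_ediv_of_pos (by omega : (0:Int) < 10)]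
  omega

-- A's recursion on a negative num1 never ends with True: num2 is eventually exhausted → False
theorem go_neg (fuel : Nat) : ∀ (num1 num2 : Int), num2.toNat < fuel → 0 ≤ num2 → num1 < 0 →
    has_numbers_go fuel num1 num2 = false := by
  induction fuel with
  | zero => intro _ _ h; omega
  | succ f ih =>
    intro num1 num2 hf h2 h1
    simp only [has_numbers_go]
    rw [if_neg (by omega)]
    by_cases hz : num2 = 0
    · simp [hz]
    · rw [if_neg hz]
      have h2p : 0 < num2 := lt_of_le_of_ne h2 (Ne.symm hz)
      have hlt : (PySem.Int.floordiv num2 10).toNat < f := by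
        have := floordiv10_lt h2p
        have := floordiv10_nonneg h2
        omega
      split
      · exact ih _ _ hlt (floordiv10_nonneg h2) (by have := floordiv10_neg h1; omega)
      · exact ih _ _ hlt (floordiv10_nonneg h2) h1

-- A's recursion on nonnegative inputs computes the greedy digit-subsequence match
theorem go_sub (fuel : Nat) : ∀ (num1 num2 : Int), num2.toNat < fuel → 0 ≤ num2 → 0 ≤ num1 →
    has_numbers_go fuel num1 num2 = subMatch (pyDigits num1) (pyDigits num2) := by
  induction fuel with
  | zero => intro _ _ h; omega
  | succ f ih =>
    intro num1 num2 hf h2 h1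
    simp only [has_numbers_go]
    by_cases hz1 : num1 = 0
    · rw [if_pos hz1, hz1, pyDigits_nonpos le_rfl, subMatch_nil]
    · have h1p : 0 < num1 := lt_of_le_of_ne h1 (Ne.symm hz1)
      rw [if_neg hz1]
      by_cases hz2 : num2 = 0
      · subst hz2
        rw [pyDigits_pos h1p, pyDigits_nonpos le_rfl]
        simp [subMatch]
      · have h2p : 0 < num2 := lt_of_le_of_ne h2 (Ne.symm hz2)
        rw [if_neg hz2, pyDigits_pos h1p, pyDigits_pos h2p]
        have hlt : (PySem.Int.floordiv num2 10).toNat < f := by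
          have := floordiv10_lt h2p
          have := floordiv10_nonneg h2
          omega
        by_cases hd : PySem.Int.mod num1 10 = PySem.Int.mod num2 10
        · rw [if_pos hd, subMatch, if_pos hd]
          exact ih _ _ hlt (floordiv10_nonneg h2) (floordiv10_nonneg h1)
        · rw [if_neg hd, subMatch, if_neg hd, ← pyDigits_pos h1p]
          exact ih _ _ hlt (floordiv10_nonneg h2) h1

-- B's fold over the haystack equals the recursive greedy match, for any start index ≤ need.length
theorem fold_sub (need : List Int) : ∀ (hay : List Int) (i : Nat), i ≤ need.length →
    (hay.foldl (fun i d => if i < need.length ∧ need.getD i 0 = d then i + 1 else i) i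
      == need.length) = subMatch (need.drop i) hay := by
  intro hay
  induction hay with
  | nil =>
    intro i hi
    by_cases h : i = need.length
    · simp [h, List.drop_length, subMatch]
    · have : need.drop i ≠ [] := by
        simp [List.drop_eq_nil_iff]; omega
      cases hd : need.drop i with
      | nil => exact absurd hd this
      | cons a l => simp [List.foldl, subMatch, h]
  | cons d hs ihh =>
    intro i hi
    simp only [List.foldl]
    by_cases hc : i < need.length ∧ need.getD i 0 = d
    · have hdrop : need.drop i = need[i] :: need.drop (i + 1) :=
        List.drop_eq_getElem_cons hc.1
      rw [if_pos hc, hdrop, subMatch]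
      have : need[i] = d := by
        have := hc.2; rwa [List.getD_eq_getElem need 0 hc.1] at this
      rw [if_pos this]
      exact ihh (i + 1) hc.1
    · rw [if_neg hc]
      by_cases h : i = need.length
      · rw [ihh i hi, h, List.drop_length, subMatch_nil, subMatch_nil]
      · have hlt : i < need.length := by omega
        have hdrop : need.drop i = need[i] :: need.drop (i + 1) :=
          List.drop_eq_getElem_cons hlt
        have hne : need[i] ≠ d := by
          intro he
          exact hc ⟨hlt, by rw [List.getD_eq_getElem need 0 hlt]; exact he⟩
        rw [ihh i hi, hdrop, subMatch, if_neg hne, ← hdrop]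

-- ===== VERDICT (by name: the statement is the Claim_ definition above) =====
theorem has_numbers_spec : Claim_equal_has_numbers := by
  intro num1 num2 _ hpre
  unfold Spec_has_numbers has_numbers has_numbers_alt
  have h2 : 0 ≤ num2 := hpre
  by_cases h1 : num1 < 0
  · rw [if_pos h1]
    exact go_neg _ _ _ (by omega) h2 h1
  · rw [if_neg h1]
    simp only
    rw [go_sub _ _ _ (by omega) h2 (by omega), fold_sub (pyDigits num1) (pyDigits num2) 0 (by omega)]
    rfl
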